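-- pv_equiv track=rewrite | github.com/rajmann/gameCreation | shuffleWords/shuffleCreatorWords.py | shuff
-- ===== SOURCE A (Python) =====
-- def shuff(line,lineTrue, right=True, fixGreens=True):
--     if line==lineTrue:
--         return line
--
--     if fixGreens:
--         #shuffle but keep greens fixed
--         lineDiff = [line[x] for x in range(len(line)) if line[x]!=lineTrue[x]]
--
--         if right:
--             lineDiffShuff = [lineDiff[-1]]+lineDiff[0:-1]
--         else:
--             lineDiffShuff = lineDiff[1:]+[lineDiff[0]]
--
--         lineNew = []
--         lineDiffCount = 0
--         for x in range(len(line)):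
--             if line[x]==lineTrue[x]:
--                 lineNew.append(line[x])
--             else:
--                 lineNew.append(lineDiffShuff[lineDiffCount])
--                 lineDiffCount+=1
--     else:
--         #shuffle ignoring greens (i.e shuffle all numbers)
--         lineDiff = line
--
--         if right:
--             lineDiffShuff = [lineDiff[-1]]+lineDiff[0:-1]
--         else:
--             lineDiffShuff = lineDiff[1:]+[lineDiff[0]]
--
--         lineNew = lineDiffShuff
--
--     return lineNew
-- ===== SOURCE B (Python) =====
-- def shuff(line, lineTrue, right=True, fixGreens=True):
--     if line == lineTrue:
--         return line
--     if fixGreens: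
--         idxs = [i for i in range(len(line)) if line[i] != lineTrue[i]]
--     else:
--         idxs = list(range(len(line)))
--     n = len(idxs)
--     result = list(line)
--     for k in range(n):
--         src = (k + n - 1) % n if right else (k + 1) % n
--         result[idxs[k]] = line[idxs[src]]
--     return result
-- ===== Notes on version B (the rewrite author's own statement) =====
-- stated objective: alternative
-- what changed: Instead of extracting the differing values, rotating them by slicing, and merging them back with a running counter, B computes the list of positions to move and permutes the copy in place via modular index arithmetic (result[idxs[k]] = line[idxs[(k±1) mod n]]) in one pass.
-- crash fix: When line != lineTrue but there is nothing to rotate (fixGreens with no differing position in the common range, or fixGreens=False with an empty line), A raises IndexError on lineDiff[-1]/lineDiff[0] while B returns the unchanged copy of line. — e.g. on shuff([], [1], true, false): A raises IndexError, B returns []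
import Mathlib
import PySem

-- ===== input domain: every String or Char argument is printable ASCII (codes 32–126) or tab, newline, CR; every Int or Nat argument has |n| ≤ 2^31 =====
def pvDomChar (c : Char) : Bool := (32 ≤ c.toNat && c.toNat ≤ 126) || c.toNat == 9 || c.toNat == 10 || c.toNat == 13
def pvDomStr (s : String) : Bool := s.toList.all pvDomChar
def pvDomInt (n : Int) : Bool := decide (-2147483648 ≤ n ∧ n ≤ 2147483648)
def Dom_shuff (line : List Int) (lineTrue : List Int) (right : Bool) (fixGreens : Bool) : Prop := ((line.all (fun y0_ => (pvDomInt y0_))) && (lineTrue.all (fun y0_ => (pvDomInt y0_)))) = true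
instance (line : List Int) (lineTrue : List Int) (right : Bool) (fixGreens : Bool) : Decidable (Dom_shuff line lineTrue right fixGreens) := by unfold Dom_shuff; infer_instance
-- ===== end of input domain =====

-- B rotates the non-matching positions by permuting a copy in place via modular index
-- arithmetic instead of A's extract/rotate-by-slicing/merge-with-counter; return value only
-- (neither program mutates its arguments).

-- ===== PORT A =====
-- Transliteration of A. In-range indexing line[x]/lineTrue[x]/lineDiffShuff[c] is ported as
-- List.getD (exact: those indices are nonnegative and in range on Pre_); lineDiff[-1],
-- lineDiff[0:-1], lineDiff[1:], lineDiff[0] use PySem primitives (exact on Pre_, where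
-- lineDiff is nonempty).
def shuff (line : List Int) (lineTrue : List Int) (right : Bool) (fixGreens : Bool) : List Int :=
  if line == lineTrue then line
  else if fixGreens then
    -- lineDiff = [line[x] for x in range(len(line)) if line[x] != lineTrue[x]]
    let lineDiff := (List.range line.length).foldl
      (fun acc x => if line.getD x 0 != lineTrue.getD x 0 then acc ++ [line.getD x 0] else acc) []
    let lineDiffShuff :=
      if right then PySem.List.pyGetD lineDiff (-1) 0 :: PySem.List.slice lineDiff (some 0) (some (-1))
      else PySem.List.slice lineDiff (some 1) none ++ [PySem.List.pyGetD lineDiff 0 0]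
    -- the lineNew / lineDiffCount loop
    ((List.range line.length).foldl
      (fun (st : List Int × Nat) x =>
        if line.getD x 0 == lineTrue.getD x 0 then (st.1 ++ [line.getD x 0], st.2)
        else (st.1 ++ [lineDiffShuff.getD st.2 0], st.2 + 1)) ([], 0)).1
  else
    let lineDiff := line
    if right then PySem.List.pyGetD lineDiff (-1) 0 :: PySem.List.slice lineDiff (some 0) (some (-1))
    else PySem.List.slice lineDiff (some 1) none ++ [PySem.List.pyGetD lineDiff 0 0]

-- ===== PORT B =====
-- Transliteration of B (Source B): index list of the positions to move, then one pass of in-place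
-- updates result[idxs[k]] = line[idxs[(k + n - 1) % n  or  (k + 1) % n]].
def shuff_alt (line : List Int) (lineTrue : List Int) (right : Bool) (fixGreens : Bool) : List Int :=
  if line == lineTrue then line
  else
    let idxs : List Nat :=
      if fixGreens then (List.range line.length).filter (fun i => line.getD i 0 != lineTrue.getD i 0)
      else List.range line.length
    let n := idxs.length
    (List.range n).foldl
      (fun res k =>
        res.set (idxs.getD k 0)
          (line.getD (idxs.getD (if right then (k + n - 1) % n else (k + 1) % n) 0) 0)) line

-- ===== PRECONDITION & SPEC =====
-- Pre_ excludes exactly the inputs where A raises IndexError: fixGreens with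
-- len(line) > len(lineTrue) (on lineTrue[x]), fixGreens with no differing common position while
-- line != lineTrue, and fixGreens=False with an empty line != lineTrue (both on lineDiff[-1]/[0]).
def Pre_shuff (line : List Int) (lineTrue : List Int) (right : Bool) (fixGreens : Bool) : Prop :=
  line = lineTrue ∨
    (if fixGreens then
        line.length ≤ lineTrue.length ∧
          (List.range line.length).any (fun i => line.getD i 0 != lineTrue.getD i 0) = true
      else line ≠ [])
instance (line : List Int) (lineTrue : List Int) (right : Bool) (fixGreens : Bool) : Decidable (Pre_shuff line lineTrue right fixGreens) := by unfold Pre_shuff; infer_instance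

def pvWitness_shuff : List Int × List Int × Bool × Bool := ([1, 2, 3], [1, 3, 2], true, true)

-- When line != lineTrue but there is nothing to rotate (fixGreens with no differing position in
-- the common range with len(line) <= len(lineTrue), or fixGreens=False with an empty line),
-- A raises IndexError on lineDiff[-1]/lineDiff[0] while B returns the unchanged copy of line.
def Raises_shuff (line : List Int) (lineTrue : List Int) (right : Bool) (fixGreens : Bool) : Prop :=
  line ≠ lineTrue ∧
    (if fixGreens then
        line.length ≤ lineTrue.length ∧
          (List.range line.length).any (fun i => line.getD i 0 != lineTrue.getD i 0) = false
      else line = [])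
instance (line : List Int) (lineTrue : List Int) (right : Bool) (fixGreens : Bool) : Decidable (Raises_shuff line lineTrue right fixGreens) := by unfold Raises_shuff; infer_instance
def pvRaiseWitness_shuff : List Int × List Int × Bool × Bool := ([], [1], true, false)
def pvRaiseWitnessOut_shuff : List Int := []

def Spec_shuff (line : List Int) (lineTrue : List Int) (right : Bool) (fixGreens : Bool) (out : List Int) : Prop := out = shuff_alt line lineTrue right fixGreens
instance (line : List Int) (lineTrue : List Int) (right : Bool) (fixGreens : Bool) (out : List Int) : Decidable (Spec_shuff line lineTrue right fixGreens out) := by unfold Spec_shuff; infer_instance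

-- ===== CLAIM (what is proved, stated in full; the proofs are below) =====
def Claim_equal_shuff : Prop := ∀ (line : List Int) (lineTrue : List Int) (right : Bool) (fixGreens : Bool), Dom_shuff line lineTrue right fixGreens → Pre_shuff line lineTrue right fixGreens → Spec_shuff line lineTrue right fixGreens (shuff line lineTrue right fixGreens)
def Claim_raises_shuff : Prop := (∀ (line : List Int) (lineTrue : List Int) (right : Bool) (fixGreens : Bool), Dom_shuff line lineTrue right fixGreens → Raises_shuff line lineTrue right fixGreens → ¬ Pre_shuff line lineTrue right fixGreens) ∧ (Dom_shuff (pvRaiseWitness_shuff.1) (pvRaiseWitness_shuff.2.1) (pvRaiseWitness_shuff.2.2.1) (pvRaiseWitness_shuff.2.2.2) ∧ Raises_shuff (pvRaiseWitness_shuff.1) (pvRaiseWitness_shuff.2.1) (pvRaiseWitness_shuff.2.2.1) (pvRaiseWitness_shuff.2.2.2) ∧ shuff_alt (pvRaiseWitness_shuff.1) (pvRaiseWitness_shuff.2.1) (pvRaiseWitness_shuff.2.2.1) (pvRaiseWitness_shuff.2.2.2) = pvRaiseWitnessOut_shuff)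

-- ===== LEMMAS AND PROOFS =====

-- the output list of A's merge loop, read off structurally
def mergeOut (sh line lineTrue : List Int) : List Nat → Nat → List Int
  | [], _ => []
  | x :: xs, c =>
      if line.getD x 0 == lineTrue.getD x 0
      then line.getD x 0 :: mergeOut sh line lineTrue xs c
      else sh.getD c 0 :: mergeOut sh line lineTrue xs (c + 1)

lemma foldA_eq (sh ln lineTrue : List Int) (l : List Nat) (acc : List Int) (c : Nat) :
    l.foldl
      (fun (st : List Int × Nat) x =>
        if ln.getD x 0 == lineTrue.getD x 0 then (st.1 ++ [ln.getD x 0], st.2)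
        else (st.1 ++ [sh.getD st.2 0], st.2 + 1)) (acc, c)
    = (acc ++ mergeOut sh ln lineTrue l c,
       c + l.countP (fun x => ln.getD x 0 != lineTrue.getD x 0)) := by
  induction l generalizing acc c with
  | nil => simp only [List.foldl_nil, mergeOut, List.append_nil, List.countP_nil, Nat.add_zero]
  | cons x xs ih =>
      simp only [List.foldl_cons, List.countP_cons, mergeOut]
      by_cases h : (ln.getD x 0 == lineTrue.getD x 0) = true
      · have hb : (ln.getD x 0 != lineTrue.getD x 0) = false := by
          simp only [bne, h, Bool.not_true]
        rw [if_pos h, if_pos h, ih]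
        simp only [hb, Bool.false_eq_true, if_false, Nat.add_zero, List.append_assoc,
          List.singleton_append]
      · have hb : (ln.getD x 0 != lineTrue.getD x 0) = true := by
          simp only [bne, Bool.not_eq_true']
          exact eq_false_of_ne_true h
        rw [if_neg h, if_neg h, ih]
        refine Prod.ext ?_ ?_
        · simp only [List.append_assoc, List.singleton_append]
        · simp only [hb, if_true]
          omega

lemma mergeOut_length (sh ln lineTrue : List Int) (l : List Nat) (c : Nat) :
    (mergeOut sh ln lineTrue l c).length = l.length := by
  induction l generalizing c with
  | nil => simp [mergeOut]
  | cons x xs ih =>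
      simp only [mergeOut]
      by_cases h : (ln.getD x 0 == lineTrue.getD x 0) = true
      · rw [if_pos h]; simp [ih]
      · rw [if_neg h]; simp [ih]

lemma mergeOut_getD (sh ln lineTrue : List Int) (l : List Nat) (c k : Nat) (hk : k < l.length) :
    (mergeOut sh ln lineTrue l c).getD k 0 =
      if ln.getD (l.getD k 0) 0 == lineTrue.getD (l.getD k 0) 0 then ln.getD (l.getD k 0) 0
      else sh.getD (c + (l.take k).countP (fun x => ln.getD x 0 != lineTrue.getD x 0)) 0 := by
  induction l generalizing c k with
  | nil => simp at hk
  | cons x xs ih =>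
      cases k with
      | zero =>
          simp only [mergeOut, List.take_zero, List.countP_nil, Nat.add_zero, List.getD_cons_zero]
          by_cases h : (ln.getD x 0 == lineTrue.getD x 0) = true
          · rw [if_pos h, if_pos h, List.getD_cons_zero]
          · rw [if_neg h, if_neg h, List.getD_cons_zero]
      | succ k =>
          have hk' : k < xs.length := by simpa using hk
          simp only [mergeOut, List.take_succ_cons, List.countP_cons, List.getD_cons_succ]
          by_cases h : (ln.getD x 0 == lineTrue.getD x 0) = true
          · have hb : (ln.getD x 0 != lineTrue.getD x 0) = false := by
              simp only [bne, h, Bool.not_true]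
            rw [if_pos h, List.getD_cons_succ, ih c k hk']
            simp only [List.countP_cons, hb, Bool.false_eq_true, if_false, Nat.add_zero]
          · have hb : (ln.getD x 0 != lineTrue.getD x 0) = true := by
              simp only [bne, Bool.not_eq_true']
              exact eq_false_of_ne_true h
            rw [if_neg h, List.getD_cons_succ, ih (c + 1) k hk']
            simp only [List.countP_cons, hb, if_true]
            by_cases h2 : (ln.getD (xs.getD k 0) 0 == lineTrue.getD (xs.getD k 0) 0) = true
            · rw [if_pos h2, if_pos h2]
            · rw [if_neg h2, if_neg h2]
              congr 1
              omega

lemma foldB_spec (idxs : List Nat) (v : Nat → Int) (xs : List Int) (m : Nat)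
    (hnd : idxs.Nodup) (hlt : ∀ i ∈ idxs, i < xs.length) (hm : m ≤ idxs.length) :
    ((List.range m).foldl (fun res k => res.set (idxs.getD k 0) (v k)) xs).length = xs.length ∧
    ∀ p : Nat,
      ((List.range m).foldl (fun res k => res.set (idxs.getD k 0) (v k)) xs)[p]? =
        if p ∈ idxs.take m then some (v (idxs.idxOf p)) else xs[p]? := by
  induction m with
  | zero => simp
  | succ m ih =>
      have hm' : m ≤ idxs.length := Nat.le_of_succ_le hm
      have hmlt : m < idxs.length := hm
      obtain ⟨ihlen, ihget⟩ := ih hm'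
      have hq : idxs.getD m 0 = idxs[m] := List.getD_eq_getElem idxs 0 hmlt
      have hqmem : idxs[m] ∈ idxs := List.getElem_mem hmlt
      have hqnot : idxs[m] ∉ idxs.take m := by
        intro hmem
        obtain ⟨j, hj, hjeq⟩ := List.getElem_of_mem hmem
        have hjm : j < m := by
          have h2 := hj
          simp only [List.length_take] at h2
          omega
        rw [List.getElem_take] at hjeq
        have := (List.Nodup.getElem_inj_iff hnd).mp hjeq
        omega
      have htake : idxs.take (m + 1) = idxs.take m ++ [idxs[m]] := by
        rw [List.take_add_one]
        simp [List.getElem?_eq_getElem hmlt]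
      rw [List.range_succ]
      refine ⟨?_, ?_⟩
      · rw [List.foldl_append, List.foldl_cons, List.foldl_nil, List.length_set, ihlen]
      · intro p
        simp only [List.foldl_append, List.foldl_cons, List.foldl_nil]
        by_cases hp : p = idxs[m]
        · subst hp
          rw [hq, List.getElem?_set_self (by rw [ihlen]; exact hlt _ hqmem)]
          rw [htake]
          have hidx : List.idxOf idxs[m] idxs = m := List.Nodup.idxOf_getElem hnd m hmlt
          rw [if_pos (List.mem_append_right _ (List.mem_singleton_self _)), hidx]
        · rw [hq, List.getElem?_set_ne (fun h => hp h.symm)]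
          rw [ihget p, htake]
          by_cases hpm : p ∈ idxs.take m
          · rw [if_pos hpm, if_pos (List.mem_append_left _ hpm)]
          · have hno : p ∉ idxs.take m ++ [idxs[m]] := by
              intro hmem
              rcases List.mem_append.mp hmem with h1 | h1
              · exact hpm h1
              · exact hp (List.mem_singleton.mp h1)
            rw [if_neg hpm, if_neg hno]

lemma idxOf_filter_range (D : Nat → Bool) (L p : Nat) (hp : p < L) (hD : D p = true) :
    ((List.range L).filter D).idxOf p = ((List.range p).filter D).length := by
  induction L with
  | zero => omega
  | succ M ih =>
      rw [List.range_succ, List.filter_append]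
      by_cases hpM : p < M
      · have hmem : p ∈ (List.range M).filter D := by
          simp [List.mem_filter, List.mem_range, hpM, hD]
        rw [List.idxOf_append, if_pos hmem]
        exact ih hpM
      · have hpe : p = M := by omega
        subst hpe
        have hnot : p ∉ (List.range p).filter D := by
          intro hmem
          have := List.mem_range.mp (List.mem_filter.mp hmem).1
          omega
        rw [List.idxOf_append, if_neg hnot]
        simp [hD]

lemma idxOf_range (L p : Nat) (hp : p < L) : (List.range L).idxOf p = p := by
  have h := idxOf_filter_range (fun _ => true) L p hp rfl
  simpa using h

lemma rotR_length (l : List Int) (hl : l ≠ []) :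
    (PySem.List.pyGetD l (-1) 0 :: PySem.List.slice l (some 0) (some (-1))).length = l.length := by
  have h1 : PySem.List.slice l (some 0) (some (-1)) = l.dropLast := by
    rw [PySem.List.slice_zero_start, PySem.List.slice_to_neg_one]
  rw [h1]
  simp only [List.length_cons, List.length_dropLast]
  have := List.length_pos_of_ne_nil hl
  omega

lemma rotR_getD (l : List Int) (hl : l ≠ []) (k : Nat) (hk : k < l.length) :
    (PySem.List.pyGetD l (-1) 0 :: PySem.List.slice l (some 0) (some (-1))).getD k 0
      = l.getD ((k + l.length - 1) % l.length) 0 := by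
  have h1 : PySem.List.slice l (some 0) (some (-1)) = l.dropLast := by
    rw [PySem.List.slice_zero_start, PySem.List.slice_to_neg_one]
  have hL : 0 < l.length := List.length_pos_of_ne_nil hl
  rw [h1]
  cases k with
  | zero =>
      rw [List.getD_cons_zero, PySem.List.pyGetD_neg_one l 0 hl]
      have hmod : (0 + l.length - 1) % l.length = l.length - 1 := by
        rw [Nat.zero_add]
        exact Nat.mod_eq_of_lt (by omega)
      rw [hmod, List.getLast_eq_getElem, List.getD_eq_getElem l 0 (by omega)]
  | succ j =>
      have hj : j < l.length - 1 := by omega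
      have hmod : (j + 1 + l.length - 1) % l.length = j := by
        have h2 : j + 1 + l.length - 1 = j + l.length := by omega
        rw [h2, Nat.add_mod_right]
        exact Nat.mod_eq_of_lt (by omega)
      rw [hmod, List.getD_cons_succ]
      rw [List.getD_eq_getElem l.dropLast 0 (by simp [List.length_dropLast]; omega),
        List.getElem_dropLast, List.getD_eq_getElem l 0 (by omega)]

lemma rotL_length (l : List Int) (hl : l ≠ []) :
    (PySem.List.slice l (some 1) none ++ [PySem.List.pyGetD l 0 0]).length = l.length := by
  rw [PySem.List.slice_from_one]
  simp only [List.length_append, List.length_tail, List.length_cons, List.length_nil]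
  have := List.length_pos_of_ne_nil hl
  omega

lemma rotL_getD (l : List Int) (hl : l ≠ []) (k : Nat) (hk : k < l.length) :
    (PySem.List.slice l (some 1) none ++ [PySem.List.pyGetD l 0 0]).getD k 0
      = l.getD ((k + 1) % l.length) 0 := by
  have hL : 0 < l.length := List.length_pos_of_ne_nil hl
  rw [PySem.List.slice_from_one, PySem.List.pyGetD_zero]
  have hlen : (l.tail ++ [l.getD 0 0]).length = l.length := by
    simp [List.length_tail]; omega
  by_cases hk1 : k < l.length - 1
  · have hmod : (k + 1) % l.length = k + 1 := Nat.mod_eq_of_lt (by omega)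
    rw [hmod, List.getD_eq_getElem _ 0 (by rw [hlen]; omega),
      List.getElem_append_left (by simp [List.length_tail]; omega),
      List.getElem_tail, List.getD_eq_getElem l 0 (by omega)]
  · have hke : k = l.length - 1 := by omega
    have hmod : (k + 1) % l.length = 0 := by
      rw [hke, Nat.sub_add_cancel hL, Nat.mod_self]
    rw [hmod, List.getD_eq_getElem _ 0 (by rw [hlen]; omega),
      List.getElem_append_right (by simp [List.length_tail]; omega)]
    simp [List.length_tail, hke]

-- the rotated list of A, read through getD, for both directions at once
lemma rot_length (l : List Int) (hl : l ≠ []) (right : Bool) :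
    (if right then PySem.List.pyGetD l (-1) 0 :: PySem.List.slice l (some 0) (some (-1))
      else PySem.List.slice l (some 1) none ++ [PySem.List.pyGetD l 0 0]).length = l.length := by
  cases right
  · exact rotL_length l hl
  · exact rotR_length l hl

lemma rot_getD (l : List Int) (hl : l ≠ []) (right : Bool) (k : Nat) (hk : k < l.length) :
    (if right then PySem.List.pyGetD l (-1) 0 :: PySem.List.slice l (some 0) (some (-1))
      else PySem.List.slice l (some 1) none ++ [PySem.List.pyGetD l 0 0]).getD k 0
      = l.getD (if right then (k + l.length - 1) % l.length else (k + 1) % l.length) 0 := by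
  cases right
  · exact rotL_getD l hl k hk
  · exact rotR_getD l hl k hk

-- ===== VERDICT (by name: the statement is the Claim_ definition above) =====
theorem shuff_spec : Claim_equal_shuff := by
  unfold Claim_equal_shuff Spec_shuff
  intro line lineTrue right fixGreens _ hPre
  by_cases heq : line = lineTrue
  · simp [shuff, shuff_alt, heq]
  · have hbeq : (line == lineTrue) = false := by simp [heq]
    rcases hPre with h | h
    · exact absurd h heq
    cases fixGreens with
    | false =>
        simp only [Bool.false_eq_true, if_false] at h
        have hL : 0 < line.length := List.length_pos_of_ne_nil h
        simp only [shuff, shuff_alt, hbeq, Bool.false_eq_true, if_false]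
        obtain ⟨hBlen, hBget⟩ := foldB_spec (List.range line.length)
          (fun k => line.getD ((List.range line.length).getD
            (if right = true
              then (k + (List.range line.length).length - 1) % (List.range line.length).length
              else (k + 1) % (List.range line.length).length) 0) 0)
          line (List.range line.length).length List.nodup_range
          (fun i hi => List.mem_range.mp hi) le_rfl
        -- (hBget already beta-reduced)
        have hAlen := rot_length line h right
        apply List.ext_getElem?
        intro i
        by_cases hi : i < line.length
        · rw [List.getElem?_eq_getElem (by rw [hAlen]; exact hi), hBget i, List.take_length,
            if_pos (List.mem_range.mpr hi)]
          rw [idxOf_range line.length i hi]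
          have hsig : (if right = true
              then (i + (List.range line.length).length - 1) % (List.range line.length).length
              else (i + 1) % (List.range line.length).length)
            = (if right = true then (i + line.length - 1) % line.length
                else (i + 1) % line.length) := by
            simp [List.length_range]
          rw [hsig]
          have hslt : (if right = true then (i + line.length - 1) % line.length
              else (i + 1) % line.length) < line.length := by
            cases right <;> simp <;> exact Nat.mod_lt _ hL
          have hrg : (List.range line.length).getD
              (if right = true then (i + line.length - 1) % line.length
                else (i + 1) % line.length) 0
              = (if right = true then (i + line.length - 1) % line.length
                  else (i + 1) % line.length) := by
            rw [List.getD_eq_getElem _ 0 (by simpa using hslt), List.getElem_range]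
          rw [hrg, ← List.getD_eq_getElem _ 0 (by rw [hAlen]; exact hi),
            rot_getD line h right i hi]
        · rw [List.getElem?_eq_none (by rw [hAlen]; omega), hBget i, List.take_length,
            if_neg (by intro hm; exact hi (List.mem_range.mp hm)),
            List.getElem?_eq_none (by omega)]
    | true =>
        simp only [if_true] at h
        obtain ⟨hlen, hany⟩ := h
        simp only [shuff, shuff_alt, hbeq, Bool.false_eq_true, if_false, if_true]
        rw [PySem.List.foldl_append_if (fun x => line.getD x 0 != lineTrue.getD x 0)
          (fun x => line.getD x 0) (List.range line.length) []]
        simp only [List.nil_append]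
        rw [foldA_eq]
        simp only [List.nil_append]
        -- notation
        have hne : (List.range line.length).filter
            (fun i => line.getD i 0 != lineTrue.getD i 0) ≠ [] := by
          obtain ⟨x, hxm, hxp⟩ := List.any_eq_true.mp hany
          exact List.ne_nil_of_mem (List.mem_filter.mpr ⟨hxm, hxp⟩)
        have hDne : ((List.range line.length).filter
            (fun i => line.getD i 0 != lineTrue.getD i 0)).map (fun x => line.getD x 0) ≠ [] := by
          simpa [List.map_eq_nil_iff] using hne
        have hn : 0 < ((List.range line.length).filter
            (fun i => line.getD i 0 != lineTrue.getD i 0)).length :=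
          List.length_pos_of_ne_nil hne
        obtain ⟨hBlen, hBget⟩ := foldB_spec
          ((List.range line.length).filter (fun i => line.getD i 0 != lineTrue.getD i 0))
          (fun k => line.getD
            (((List.range line.length).filter (fun i => line.getD i 0 != lineTrue.getD i 0)).getD
              (if right = true
                then (k + ((List.range line.length).filter
                    (fun i => line.getD i 0 != lineTrue.getD i 0)).length - 1) %
                  ((List.range line.length).filter
                    (fun i => line.getD i 0 != lineTrue.getD i 0)).length
                else (k + 1) % ((List.range line.length).filter
                    (fun i => line.getD i 0 != lineTrue.getD i 0)).length) 0) 0)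
          line ((List.range line.length).filter
            (fun i => line.getD i 0 != lineTrue.getD i 0)).length
          (List.Nodup.filter _ List.nodup_range)
          (fun i hi => List.mem_range.mp (List.mem_filter.mp hi).1) le_rfl
        -- (hBget already beta-reduced)
        have hAlen : ∀ sh : List Int,
            (mergeOut sh line lineTrue (List.range line.length) 0).length = line.length := by
          intro sh
          rw [mergeOut_length, List.length_range]
        apply List.ext_getElem?
        intro i
        by_cases hi : i < line.length
        · rw [List.getElem?_eq_getElem (by rw [hAlen]; exact hi), hBget i, List.take_length,
            ← List.getD_eq_getElem _ 0 (by rw [hAlen]; exact hi)]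
          rw [mergeOut_getD _ line lineTrue (List.range line.length) 0 i
            (by simpa using hi)]
          have hri : (List.range line.length).getD i 0 = i := by
            rw [List.getD_eq_getElem _ 0 (by simpa using hi), List.getElem_range]
          rw [hri]
          by_cases hD : (line.getD i 0 == lineTrue.getD i 0) = true
          · have hnm : i ∉ (List.range line.length).filter
                (fun i => line.getD i 0 != lineTrue.getD i 0) := by
              intro hm
              have := (List.mem_filter.mp hm).2
              simp only [bne, hD, Bool.not_true] at this
              exact absurd this (by simp)
            rw [if_pos hD, if_neg hnm, List.getElem?_eq_getElem hi,
              List.getD_eq_getElem line 0 hi]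
          · have hDi : (fun x => line.getD x 0 != lineTrue.getD x 0) i = true := by
              simp only [bne, Bool.not_eq_true']
              exact eq_false_of_ne_true hD
            have hmem : i ∈ (List.range line.length).filter
                (fun i => line.getD i 0 != lineTrue.getD i 0) :=
              List.mem_filter.mpr ⟨List.mem_range.mpr hi, hDi⟩
            have hidx := idxOf_filter_range
              (fun x => line.getD x 0 != lineTrue.getD x 0) line.length i hi hDi
            have hr : ((List.range i).filter
                (fun x => line.getD x 0 != lineTrue.getD x 0)).length
                < ((List.range line.length).filter
                  (fun i => line.getD i 0 != lineTrue.getD i 0)).length := by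
              rw [← hidx]
              exact List.idxOf_lt_length_iff.mpr hmem
            rw [if_neg hD, if_pos hmem, hidx]
            rw [List.take_range, Nat.min_eq_left (Nat.le_of_lt hi),
              List.countP_eq_length_filter, Nat.zero_add]
            rw [rot_getD _ hDne right _ (by rw [List.length_map]; exact hr)]
            simp only [List.length_map]
            have hslt : (if right = true
                then (((List.range i).filter
                    (fun x => line.getD x 0 != lineTrue.getD x 0)).length +
                  ((List.range line.length).filter
                    (fun i => line.getD i 0 != lineTrue.getD i 0)).length - 1) %
                  ((List.range line.length).filter
                    (fun i => line.getD i 0 != lineTrue.getD i 0)).length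
                else (((List.range i).filter
                    (fun x => line.getD x 0 != lineTrue.getD x 0)).length + 1) %
                  ((List.range line.length).filter
                    (fun i => line.getD i 0 != lineTrue.getD i 0)).length)
                < ((List.range line.length).filter
                    (fun i => line.getD i 0 != lineTrue.getD i 0)).length := by
              cases right <;> simp <;> exact Nat.mod_lt _ hn
            rw [List.getD_eq_getElem _ 0 (by rw [List.length_map]; exact hslt),
              List.getElem_map, ← List.getD_eq_getElem _ 0 hslt]
        · rw [List.getElem?_eq_none (by rw [hAlen]; omega), hBget i, List.take_length,
            if_neg (by
              intro hm
              exact hi (List.mem_range.mp (List.mem_filter.mp hm).1)),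
            List.getElem?_eq_none (by omega)]

@[simp] theorem shuff_raises : Claim_raises_shuff := by
  unfold Claim_raises_shuff
  constructor
  · intro line lineTrue right fixGreens hDom hR hPre
    obtain ⟨hne, hR2⟩ := hR
    rcases hPre with h | h
    · exact hne h
    cases fixGreens
    · simp only [if_false, Bool.false_eq_true] at h hR2
      exact h hR2
    · simp only [if_true] at h hR2
      exact absurd h.2 (by rw [hR2.2]; simp)
  · decide
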